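-- pv_equiv track=rewrite | github.com/lewinskie254/leet | Subconcat.py | word_checker
-- ===== SOURCE A (Python) =====
-- def permutation(lst):
-- 	if len(lst) == 0:
-- 		return []
-- 	if len(lst) == 1:
-- 		return [lst]
--
-- 	l = []
-- 	for i in range(len(lst)):
-- 		m = lst[i]
-- 		remLst = lst[:i] + lst[i+1:]
-- 		for p in permutation(remLst):
-- 			l.append([m] + p)
-- 	return l
--
-- def word_checker(words):
-- 	word_permutations = permutation(words)
-- 	words_to_check = []
--
-- 	for word in word_permutations:
-- 		word_to_append = ""
-- 		for i in range(len(word)):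
-- 			word_to_append += word[i]
--
-- 		words_to_check.append(word_to_append)
--
-- 	return words_to_check
-- ===== SOURCE B (Python) =====
-- def word_checker(words):
--     # Iterative DFS with an explicit stack, building each concatenated string
--     # directly (no intermediate permutation lists).
--     if not words:
--         return []
--     result = []
--     stack = [("", words)]
--     while stack:
--         prefix, rest = stack.pop()
--         if not rest:
--             result.append(prefix)
--         else:
--             for i in range(len(rest) - 1, -1, -1):
--                 stack.append((prefix + rest[i], rest[:i] + rest[i + 1:]))
--     return result
-- ===== Notes on version B (the rewrite author's own statement) =====
-- stated objective: alternative
-- what changed: Replaced A's recursive permutation helper (which builds lists of word-lists and then joins each in a second pass) with a single iterative depth-first search over an explicit stack of (prefix, remaining-words) states that builds each concatenated string directly, with no intermediate permutation lists.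
import Mathlib
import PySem

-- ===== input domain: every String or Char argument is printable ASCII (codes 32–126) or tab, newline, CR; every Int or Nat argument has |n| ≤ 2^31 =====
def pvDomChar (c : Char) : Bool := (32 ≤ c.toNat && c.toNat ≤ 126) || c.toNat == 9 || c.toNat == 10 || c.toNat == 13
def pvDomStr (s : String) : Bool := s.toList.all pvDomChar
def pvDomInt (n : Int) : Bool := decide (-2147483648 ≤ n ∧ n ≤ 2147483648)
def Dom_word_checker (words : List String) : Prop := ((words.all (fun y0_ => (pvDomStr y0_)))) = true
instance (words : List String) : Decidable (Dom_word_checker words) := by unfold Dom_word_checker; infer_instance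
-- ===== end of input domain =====

-- B replaces A's recursive permutation-lists-then-join with an iterative explicit-stack DFS
-- that builds the concatenated strings directly (objective: alternative decomposition).


-- ===== PORT A =====
-- A's `permutation`, with a fuel argument only to convince Lean of termination;
-- fuel = lst.length suffices because each recursive call shortens the list by one.
def permutationFuel : Nat → List String → List (List String)
  | 0, _ => []
  | f + 1, lst =>
    if lst.length = 0 then []
    else if lst.length = 1 then [lst]
    else
      -- for i in range(len(lst)): m = lst[i]; remLst = lst[:i] + lst[i+1:]; append [m]+p
      (PySem.List.pyRange 0 lst.length 1).foldl
        (fun l i =>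
          l ++ (permutationFuel f
                  (PySem.List.slice lst none (some i) ++ PySem.List.slice lst (some (i + 1)) none)).map
                 (fun p => PySem.List.pyGetD lst i "" :: p)) []

def permutationA (lst : List String) : List (List String) := permutationFuel lst.length lst

-- the inner join loop of word_checker: word_to_append = ""; for i in range(len(word)): word_to_append += word[i]
def joinLoopA (word : List String) : String :=
  (PySem.List.pyRange 0 word.length 1).foldl (fun s i => s ++ PySem.List.pyGetD word i "") ""

def word_checker (words : List String) : List String :=
  (permutationA words).foldl (fun acc w => acc ++ [joinLoopA w]) []

-- ===== PORT B =====
-- the inner `for i in range(len(rest)-1, -1, -1): stack.append(...)` loop of Source B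
def pushChildrenB (pre : String) (rest : List String) (st : List (String × List String)) :
    List (String × List String) :=
  (PySem.List.pyRange ((rest.length : Int) - 1) (-1) (-1)).foldl
    (fun st i =>
      (pre ++ PySem.List.pyGetD rest i "",
       PySem.List.slice rest none (some i) ++ PySem.List.slice rest (some (i + 1)) none) :: st) st

-- the while loop; fuel only for termination ((n+1)! bounds the number of iterations)
def loopB : Nat → List (String × List String) → List String → List String
  | 0, _, res => res
  | _ + 1, [], res => res
  | f + 1, (pre, rest) :: st, res =>
    if rest = [] then loopB f st (res ++ [pre])
    else loopB f (pushChildrenB pre rest st) res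

def word_checker_alt (words : List String) : List String :=
  if words = [] then []
  else loopB (Nat.factorial (words.length + 1)) [("", words)] []

-- ===== PRECONDITION & SPEC =====
def Spec_word_checker (words : List String) (out : List String) : Prop := out = word_checker_alt words
instance (words : List String) (out : List String) : Decidable (Spec_word_checker words out) := by unfold Spec_word_checker; infer_instance

-- ===== CLAIM (what is proved, stated in full; the proofs are below) =====
def Claim_equal_word_checker : Prop := ∀ (words : List String), Dom_word_checker words → Spec_word_checker words (word_checker words)

-- ===== LEMMAS AND PROOFS =====

-- fold of string concatenation with a moved seed
theorem foldl_strAppend_seed (l : List String) (a b : String) :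
    l.foldl (· ++ ·) (a ++ b) = a ++ l.foldl (· ++ ·) b := by
  induction l generalizing b with
  | nil => rfl
  | cons x xs ih => simp only [List.foldl_cons, String.append_assoc, ih]

theorem joinLoopA_eq (w : List String) : joinLoopA w = w.foldl (· ++ ·) "" := by
  unfold joinLoopA
  exact PySem.List.foldl_pyRange_zero_pyGetD w "" (· ++ ·) ""

theorem joinLoopA_cons (m : String) (p : List String) :
    joinLoopA (m :: p) = m ++ joinLoopA p := by
  simp only [joinLoopA_eq, List.foldl_cons]
  rw [show "" ++ m = m by simp, show m = m ++ "" by simp]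
  rw [foldl_strAppend_seed]
  simp

theorem word_checker_eq_map (words : List String) :
    word_checker words = (permutationA words).map joinLoopA := by
  unfold word_checker
  exact PySem.List.foldl_append_singleton_eq_map joinLoopA (permutationA words) []

-- the recurrence A's permutation satisfies for lists of length ≥ 2
theorem permutationA_rec (lst : List String) (h : 2 ≤ lst.length) :
    permutationA lst =
      (List.range lst.length).flatMap
        (fun i => (permutationA (lst.take i ++ lst.drop (i + 1))).map (fun p => lst.getD i "" :: p)) := by
  obtain ⟨f, hf⟩ : ∃ f, lst.length = f + 1 := ⟨lst.length - 1, by omega⟩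
  unfold permutationA
  conv_lhs => rw [hf]
  rw [show permutationFuel (f + 1) lst =
      (PySem.List.pyRange 0 lst.length 1).foldl
        (fun l i =>
          l ++ (permutationFuel f
                  (PySem.List.slice lst none (some i) ++ PySem.List.slice lst (some (i + 1)) none)).map
                 (fun p => PySem.List.pyGetD lst i "" :: p)) [] from by
    rw [permutationFuel, if_neg (by omega), if_neg (by omega)]]
  rw [show ((lst.length : Int)) = ((lst.length : Nat) : Int) from rfl, PySem.List.pyRange_zero_nat,
      List.foldl_map]
  rw [PySem.List.foldl_congr_mem _ _
      (fun l (i : Nat) => l ++ (permutationA (lst.take i ++ lst.drop (i + 1))).map (fun p => lst.getD i "" :: p)) []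
      (by
        intro acc i hi
        rw [List.mem_range] at hi
        rw [PySem.List.pyGetD_natCast, PySem.List.slice_to lst (by positivity),
            show ((i : Int) + 1) = ((i + 1 : Nat) : Int) by push_cast; ring,
            PySem.List.slice_from lst (by positivity)]
        simp only [Int.toNat_natCast]
        congr 2
        unfold permutationA
        congr 1
        simp [List.length_take, List.length_drop]
        omega)]
  rw [PySem.List.foldl_append_eq_flatMap]
  rfl

-- the semantics of one stack entry: the strings it will contribute, in order
def Espec (pre : String) (rest : List String) : List String :=
  if rest = [] then [pre] else (permutationA rest).map (fun p => pre ++ joinLoopA p)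

theorem Espec_rec (pre : String) (rest : List String) (h : rest ≠ []) :
    Espec pre rest =
      (List.range rest.length).flatMap
        (fun i => Espec (pre ++ rest.getD i "") (rest.take i ++ rest.drop (i + 1))) := by
  rcases Nat.lt_or_ge rest.length 2 with h2 | h2
  · -- length 1
    obtain ⟨x, rfl⟩ : ∃ x, rest = [x] := by
      cases rest with
      | nil => exact absurd rfl h
      | cons a t => cases t with
        | nil => exact ⟨a, rfl⟩
        | cons b u => simp at h2
    rw [show List.range ([x].length) = [0] from rfl]
    simp only [List.flatMap_cons, List.flatMap_nil, List.append_nil]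
    rw [show List.take 0 [x] ++ List.drop (0 + 1) [x] = ([] : List String) from rfl]
    unfold Espec
    rw [if_neg (by simp), if_pos rfl, show permutationA [x] = [[x]] from rfl]
    simp only [List.map_cons, List.map_nil, List.getD_cons_zero]
    rw [joinLoopA_cons, show joinLoopA [] = "" from rfl]
    simp
  · -- length ≥ 2
    unfold Espec
    rw [if_neg h, permutationA_rec rest h2, List.map_flatMap]
    refine List.flatMap_congr (fun i hi => ?_)
    rw [List.mem_range] at hi
    have hlen2 : (rest.take i ++ rest.drop (i + 1)).length = rest.length - 1 := by
      simp only [List.length_append, List.length_take, List.length_drop]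
      omega
    have hne : rest.take i ++ rest.drop (i + 1) ≠ [] := by
      intro hnil
      rw [hnil] at hlen2
      simp at hlen2
      omega
    rw [if_neg hne, List.map_map]
    refine List.map_congr_left (fun p _ => ?_)
    simp only [Function.comp]
    rw [joinLoopA_cons, String.append_assoc]

theorem foldl_consPush {α β : Type} (l : List α) (g : α → β) (st : List β) :
    l.foldl (fun st i => g i :: st) st = (l.map g).reverse ++ st := by
  induction l generalizing st with
  | nil => rfl
  | cons x xs ih => simp [ih]

-- the reversed-range push loop builds the children in index order on top of the stack
theorem pushChildrenB_eq (pre : String) (rest : List String) (st : List (String × List String)) :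
    pushChildrenB pre rest st =
      ((List.range rest.length).map
        (fun i => (pre ++ rest.getD i "", rest.take i ++ rest.drop (i + 1)))) ++ st := by
  unfold pushChildrenB
  rw [PySem.List.pyRange_neg_one_eq_reverse]
  rw [show ((-1 : Int) + 1) = 0 by ring, show ((rest.length : Int) - 1) + 1 = (rest.length : Int) by ring]
  rw [PySem.List.pyRange_zero_nat, foldl_consPush, ← List.map_reverse, List.reverse_reverse, List.map_map]
  congr 1
  refine List.map_congr_left (fun i hi => ?_)
  simp only [Function.comp]
  rw [PySem.List.pyGetD_natCast, PySem.List.slice_to rest (by positivity),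
      show ((i : Int) + 1) = ((i + 1 : Nat) : Int) by push_cast; ring,
      PySem.List.slice_from rest (by positivity)]
  simp

-- weight of a stack: bounds the number of loop iterations remaining
def wtB (e : String × List String) : Nat := (e.2.length + 1).factorial

theorem loopB_inv (f : Nat) (st : List (String × List String)) (res : List String)
    (hf : (st.map wtB).sum ≤ f) :
    loopB f st res = res ++ st.flatMap (fun e => Espec e.1 e.2) := by
  induction f generalizing st res with
  | zero =>
    cases st with
    | nil => simp [loopB]
    | cons e st' =>
      exfalso
      have h1 : 1 ≤ wtB e := Nat.one_le_iff_ne_zero.mpr (Nat.factorial_ne_zero _)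
      simp only [List.map_cons, List.sum_cons] at hf
      omega
  | succ f ih =>
    cases st with
    | nil => simp [loopB]
    | cons e st' =>
      obtain ⟨pre, rest⟩ := e
      by_cases hrest : rest = []
      · subst hrest
        rw [show loopB (f + 1) ((pre, []) :: st') res = loopB f st' (res ++ [pre]) from by
          rw [loopB, if_pos rfl]]
        rw [ih _ _ (by
          simp only [List.map_cons, List.sum_cons] at hf
          have h1 : wtB (pre, ([] : List String)) = 1 := rfl
          omega)]
        simp [Espec]
      · rw [show loopB (f + 1) ((pre, rest) :: st') res = loopB f (pushChildrenB pre rest st') res from by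
          rw [loopB, if_neg hrest]]
        have hlen : 1 ≤ rest.length := by
          cases rest with
          | nil => exact absurd rfl hrest
          | cons a t => simp
        have hwt : ((pushChildrenB pre rest st').map wtB).sum ≤ f := by
          rw [pushChildrenB_eq, List.map_append, List.sum_append, List.map_map]
          have hc : ((List.range rest.length).map
              (wtB ∘ fun i => (pre ++ rest.getD i "", rest.take i ++ rest.drop (i + 1)))).sum
              = rest.length * rest.length.factorial := by
            rw [List.map_congr_left (g := fun _ => rest.length.factorial) (fun i hi => by
              rw [List.mem_range] at hi
              simp only [Function.comp, wtB]
              congr 2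
              simp [List.length_take, List.length_drop]
              omega)]
            simp [List.map_const']
          rw [hc]
          simp only [List.map_cons, List.sum_cons, wtB] at hf
          have hfact : rest.length * rest.length.factorial + 1 ≤ (rest.length + 1).factorial := by
            rw [Nat.factorial_succ]
            have := Nat.one_le_iff_ne_zero.mpr (Nat.factorial_ne_zero rest.length)
            nlinarith
          omega
        rw [ih _ _ hwt, pushChildrenB_eq, List.flatMap_append, List.flatMap_map]
        simp [Espec_rec pre rest hrest]

-- ===== VERDICT (by name: the statement is the Claim_ definition above) =====
theorem word_checker_spec : Claim_equal_word_checker := by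
  intro words _
  unfold Spec_word_checker word_checker_alt
  by_cases hw : words = []
  · subst hw; rfl
  · rw [if_neg hw, loopB_inv _ _ _ (by simp [wtB])]
    simp only [List.flatMap_cons, List.flatMap_nil, List.append_nil, List.nil_append]
    rw [word_checker_eq_map]
    unfold Espec
    rw [if_neg hw]
    exact List.map_congr_left (fun p _ => by simp)
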